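-- pv_equiv track=rewrite | github.com/ejhover/PublicCode | TA_work/homeworks/hw11/hw11.py | two_es
-- ===== SOURCE A (Python) =====
-- def two_es(lines):
--     if not lines:
--         return False
--     if lines[0].count('e')==2:
--             return True
--     if len(lines)==1:
--         if lines[0].count('e')==2:
--             return True
--         else:
--             return False
--     else:
--         return two_es(lines[1:])
-- ===== SOURCE B (Python) =====
-- def two_es(lines):
--     for line in lines:
--         if line.count('e') == 2:
--             return True
--     return False
-- ===== Notes on version B (the rewrite author's own statement) =====
-- stated objective: simpler
-- what changed: Replaces the recursive traversal with its redundant single-element special case and repeated tail slicing by one flat iterative scan with an early return.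
import Mathlib
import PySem

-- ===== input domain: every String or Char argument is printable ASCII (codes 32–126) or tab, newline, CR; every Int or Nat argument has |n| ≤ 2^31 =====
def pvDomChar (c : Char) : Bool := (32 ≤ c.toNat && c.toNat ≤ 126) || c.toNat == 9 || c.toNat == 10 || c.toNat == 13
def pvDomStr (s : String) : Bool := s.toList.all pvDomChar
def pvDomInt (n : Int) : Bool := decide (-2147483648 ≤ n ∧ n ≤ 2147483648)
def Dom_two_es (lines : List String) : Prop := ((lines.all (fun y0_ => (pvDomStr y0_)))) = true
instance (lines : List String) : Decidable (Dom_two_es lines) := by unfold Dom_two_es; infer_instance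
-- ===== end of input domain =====

-- B replaces A's recursion (with its redundant single-element branch and tail slicing)
-- by one flat scan with an early return; objective: simpler.

-- ===== PORT A =====
-- A: if not lines: False; if lines[0].count('e')==2: True; if len(lines)==1: re-test lines[0];
-- else recurse on lines[1:] (the tail of a nonempty list).
def two_es : List String → Bool
  | [] => false
  | l :: rest =>
    if PySem.Str.count l "e" = 2 then true
    else if (l :: rest).length = 1 then
      (if PySem.Str.count l "e" = 2 then true else false)
    else two_es rest

-- ===== PORT B =====
-- B: for line in lines: if line.count('e')==2: return True; return False  (early-return scan)
def two_es_alt : List String → Bool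
  | [] => false
  | line :: more => if PySem.Str.count line "e" = 2 then true else two_es_alt more

-- ===== PRECONDITION & SPEC =====
def Spec_two_es (lines : List String) (out : Bool) : Prop := out = two_es_alt lines
instance (lines : List String) (out : Bool) : Decidable (Spec_two_es lines out) := by unfold Spec_two_es; infer_instance

-- ===== CLAIM (what is proved, stated in full; the proofs are below) =====
def Claim_equal_two_es : Prop := ∀ (lines : List String), Dom_two_es lines → Spec_two_es lines (two_es lines)

-- ===== LEMMAS AND PROOFS =====
theorem two_es_eq_alt (lines : List String) : two_es lines = two_es_alt lines := by
  induction lines with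
  | nil => rfl
  | cons l rest ih =>
    cases rest with
    | nil => simp [two_es, two_es_alt]
    | cons r rs =>
      rw [two_es, two_es_alt, ih]
      norm_num
      rfl

-- ===== VERDICT (by name: the statement is the Claim_ definition above) =====
theorem two_es_spec : Claim_equal_two_es := by
  intro lines _
  exact two_es_eq_alt lines
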